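-- pv_equiv track=rewrite | github.com/remr2005/DataAnalys1lab | fibonachi.py | FibSums
-- ===== SOURCE A (Python) =====
-- def FibSums(n: int):
--     sum = 0
--     fr = 0
--     sc = 1
--     for i in range(n):
--         if i == 0:
--             yield 0
--         else:
--             sum += fr
--             yield sum
--         fr, sc = sc, fr + sc
-- ===== SOURCE B (Python) =====
-- def FibSums(n: int):
--     # cumulative sums of Fibonacci numbers via F(i+2)-1: keep one Fibonacci pair only
--     a, b = 1, 2
--     for _ in range(n):
--         yield a - 1
--         a, b = b, a + b
-- ===== Notes on version B (the rewrite author's own statement) =====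
-- stated objective: simpler
-- what changed: Replaces the running-sum accumulator and the i==0 special case by the identity sum(F_1..F_k)=F(k+2)-1: B keeps a single Fibonacci pair (a,b)=(F(i+2),F(i+3)) and yields a-1 each step.
import Mathlib
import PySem

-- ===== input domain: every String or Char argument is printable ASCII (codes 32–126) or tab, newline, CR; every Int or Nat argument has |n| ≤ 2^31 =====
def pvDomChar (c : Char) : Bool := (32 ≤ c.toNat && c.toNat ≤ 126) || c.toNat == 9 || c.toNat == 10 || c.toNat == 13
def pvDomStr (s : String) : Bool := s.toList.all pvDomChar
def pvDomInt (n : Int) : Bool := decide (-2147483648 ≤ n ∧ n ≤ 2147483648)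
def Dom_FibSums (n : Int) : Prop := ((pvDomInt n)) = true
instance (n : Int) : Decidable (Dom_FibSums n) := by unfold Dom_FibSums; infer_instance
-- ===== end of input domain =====

-- B replaces A's running-sum accumulator and i==0 branch by the identity sum(F_1..F_k)=F(k+2)-1,
-- keeping only a Fibonacci pair and yielding a-1 each step (objective: simpler).

-- ===== PORT A =====
-- loop body of A: state (sum, fr, sc, yielded-so-far), loop variable i
def pvStepA (st : Int × Int × Int × List Int) (i : Int) : Int × Int × Int × List Int :=
  match st with
  | (sum, fr, sc, out) =>
    if i == 0 then (sum, sc, fr + sc, out ++ [(0 : Int)])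
    else (sum + fr, sc, fr + sc, out ++ [sum + fr])

def FibSums (n : Int) : List Int :=
  ((PySem.List.pyRange 0 n 1).foldl pvStepA (0, 0, 1, [])).2.2.2

-- ===== PORT B =====
-- loop body of B: state (a, b, yielded-so-far); the loop variable is unused
def pvStepB (st : Int × Int × List Int) (_ : Int) : Int × Int × List Int :=
  match st with
  | (a, b, out) => (b, a + b, out ++ [a - 1])

def FibSums_alt (n : Int) : List Int :=
  ((PySem.List.pyRange 0 n 1).foldl pvStepB (1, 2, [])).2.2

-- ===== PRECONDITION & SPEC =====
def Spec_FibSums (n : Int) (out : List Int) : Prop := out = FibSums_alt n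
instance (n : Int) (out : List Int) : Decidable (Spec_FibSums n out) := by unfold Spec_FibSums; infer_instance

-- ===== CLAIM (what is proved, stated in full; the proofs are below) =====
def Claim_equal_FibSums : Prop := ∀ (n : Int), Dom_FibSums n → Spec_FibSums n (FibSums n)

-- ===== LEMMAS AND PROOFS =====

-- Fibonacci numbers as Int, used only to state the loop invariant
def pvFib : Nat → Int
  | 0 => 0
  | 1 => 1
  | (k + 2) => pvFib k + pvFib (k + 1)

-- joint loop invariant after k ≥ 1 iterations:
-- A's state is (F(k+1)-1, F(k), F(k+1), L); B's state is (F(k+2), F(k+3), L) with the SAME output list L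
lemma pv_loop_inv (k : Nat) (hk : 1 ≤ k) :
    ∃ L : List Int,
      (PySem.List.pyRange 0 (k : Int) 1).foldl pvStepA (0, 0, 1, []) =
        (pvFib (k + 1) - 1, pvFib k, pvFib (k + 1), L) ∧
      (PySem.List.pyRange 0 (k : Int) 1).foldl pvStepB (1, 2, []) =
        (pvFib (k + 2), pvFib (k + 3), L) := by
  induction k, hk using Nat.le_induction with
  | base =>
      refine ⟨[0], ?_, ?_⟩ <;> decide
  | succ k hk ih =>
      obtain ⟨L, hA, hB⟩ := ih
      have hsplit : PySem.List.pyRange 0 ((k + 1 : Nat) : Int) 1 =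
          PySem.List.pyRange 0 (k : Int) 1 ++ [(k : Int)] := by
        push_cast
        exact PySem.List.pyRange_one_succ_right (by exact_mod_cast Nat.zero_le k)
      have hkne : ((k : Int) == 0) = false := by
        simp; omega
      have h2 : pvFib (k + 2) = pvFib k + pvFib (k + 1) := rfl
      have h4 : pvFib (k + 4) = pvFib (k + 2) + pvFib (k + 3) := rfl
      have e : pvFib (k + 1) - 1 + pvFib k = pvFib k + pvFib (k + 1) - 1 := by ring
      refine ⟨L ++ [pvFib k + pvFib (k + 1) - 1], ?_, ?_⟩
      · rw [hsplit, List.foldl_append, hA]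
        simp only [List.foldl, pvStepA, hkne, Bool.false_eq_true, if_false,
          show k + 1 + 1 = k + 2 from rfl]
        rw [h2, e]
      · rw [hsplit, List.foldl_append, hB]
        simp only [List.foldl, pvStepB,
          show k + 1 + 2 = k + 3 from by omega, show k + 1 + 3 = k + 4 from by omega]
        rw [h4, h2]

-- ===== VERDICT (by name: the statement is the Claim_ definition above) =====
theorem FibSums_spec : Claim_equal_FibSums := by
  intro n _
  unfold Spec_FibSums FibSums FibSums_alt
  by_cases h : n ≤ 0
  · rw [PySem.List.pyRange_one_eq_nil h]
    rfl
  · have hk : 1 ≤ n.toNat := by omega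
    have hn : (n.toNat : Int) = n := by omega
    obtain ⟨L, hA, hB⟩ := pv_loop_inv n.toNat hk
    rw [hn] at hA hB
    rw [hA, hB]
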